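-- pv_equiv track=rewrite | github.com/Den-Larin/Labs | 3.py | min_odd
-- ===== SOURCE A (Python) =====
-- def min_odd(lst):
--     min = 0
--     for i in range(len(lst)):
--         if lst[i] % 2 == 1:
--             min = lst[i]
--             break
--     for i in range(len(lst)):
--         if lst[i] % 2 == 1:
--             if lst[i] < min:
--                 min = lst[i]
--     if min != 0:
--         return min
--     else:
--         return 0
-- ===== SOURCE B (Python) =====
-- def min_odd(lst):
--     odds = sorted(x for x in lst if x % 2 == 1)
--     return odds[0] if odds else 0
-- ===== Notes on version B (the rewrite author's own statement) =====
-- stated objective: alternative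
-- what changed: Replaces A's two index-loop scans (seed first odd via break, then rescan for smaller) by sorting the odd elements and taking the first element of the sorted list (0 if there are none).
import Mathlib
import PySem

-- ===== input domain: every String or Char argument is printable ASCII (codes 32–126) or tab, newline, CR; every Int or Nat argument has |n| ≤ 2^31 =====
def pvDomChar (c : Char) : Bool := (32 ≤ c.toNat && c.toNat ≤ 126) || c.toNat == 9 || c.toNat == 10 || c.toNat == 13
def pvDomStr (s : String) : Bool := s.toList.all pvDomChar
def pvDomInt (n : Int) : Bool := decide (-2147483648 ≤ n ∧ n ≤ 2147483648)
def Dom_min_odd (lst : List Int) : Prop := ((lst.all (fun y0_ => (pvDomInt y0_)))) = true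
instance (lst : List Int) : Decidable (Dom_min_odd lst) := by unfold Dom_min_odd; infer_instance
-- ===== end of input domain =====

-- B replaces A's two index-loop scans (seed first odd via break, then rescan for smaller)
-- by sorting the odd elements and taking the first of the sorted list, 0 if none (objective: alternative).


-- ===== PORT A =====
-- first loop: scan for the first odd element, break → structural recursion over the list
def minOddSeed : List Int → Int
  | [] => 0
  | x :: xs => if PySem.Int.mod x 2 = 1 then x else minOddSeed xs

def min_odd (lst : List Int) : Int :=
  let m0 := minOddSeed lst
  -- second loop: rescan the whole list for a smaller odd element
  let m := lst.foldl (fun m x => if PySem.Int.mod x 2 = 1 then (if x < m then x else m) else m) m0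
  if m ≠ 0 then m else 0

-- ===== PORT B =====
def min_odd_alt (lst : List Int) : Int :=
  let odds := PySem.List.sorted (lst.filter (fun x => PySem.Int.mod x 2 = 1)) (fun x => x) false
  match odds with
  | [] => 0
  | m :: _ => m

-- ===== PRECONDITION & SPEC =====
def Spec_min_odd (lst : List Int) (out : Int) : Prop := out = min_odd_alt lst
instance (lst : List Int) (out : Int) : Decidable (Spec_min_odd lst out) := by unfold Spec_min_odd; infer_instance

-- ===== CLAIM (what is proved, stated in full; the proofs are below) =====
def Claim_equal_min_odd : Prop := ∀ (lst : List Int), Dom_min_odd lst → Spec_min_odd lst (min_odd lst)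

-- ===== LEMMAS AND PROOFS =====

-- A's second loop over the whole list is the min-fold over the filtered list
theorem foldl_step_filter (l : List Int) (m : Int) :
    l.foldl (fun m x => if PySem.Int.mod x 2 = 1 then (if x < m then x else m) else m) m
      = (l.filter (fun x => PySem.Int.mod x 2 = 1)).foldl min m := by
  induction l generalizing m with
  | nil => rfl
  | cons x xs ih =>
    simp only [List.foldl_cons, List.filter_cons]
    by_cases h : PySem.Int.mod x 2 = 1
    · simp only [h, decide_true, ite_true, List.foldl_cons]
      rw [ih]
      congr 1
      simp only [min_def]
      split_ifs <;> omega
    · simp only [h, decide_false, Bool.false_eq_true, ite_false, ih]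

-- A's first loop returns 0 iff the list has no odd element, else the first odd element
theorem minOddSeed_eq (l : List Int) :
    minOddSeed l = (match l.filter (fun x => PySem.Int.mod x 2 = 1) with
                    | [] => 0 | y :: _ => y) := by
  induction l with
  | nil => rfl
  | cons x xs ih =>
    simp only [minOddSeed, List.filter_cons]
    by_cases h : PySem.Int.mod x 2 = 1
    · simp only [h, decide_true, ite_true]
    · simp only [h, decide_false, Bool.false_eq_true, ite_false, ih]

-- the min-fold is a lower bound of its seed and of every element
theorem foldl_min_le (l : List Int) (a : Int) :
    l.foldl min a ≤ a ∧ ∀ x ∈ l, l.foldl min a ≤ x := by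
  induction l generalizing a with
  | nil => simp
  | cons y ys ih =>
    simp only [List.foldl_cons, List.mem_cons]
    refine ⟨le_trans (ih (min a y)).1 (min_le_left _ _), ?_⟩
    rintro x (rfl | hx)
    · exact le_trans (ih (min a x)).1 (min_le_right _ _)
    · exact (ih (min a y)).2 x hx

-- the min-fold returns its seed or a member of the list
theorem foldl_min_mem (l : List Int) (a : Int) :
    l.foldl min a = a ∨ l.foldl min a ∈ l := by
  induction l generalizing a with
  | nil => simp
  | cons y ys ih =>
    simp only [List.foldl_cons, List.mem_cons]
    rcases ih (min a y) with h | h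
    · rw [h, min_def]; split_ifs with hle
      · exact Or.inl rfl
      · exact Or.inr (Or.inl rfl)
    · exact Or.inr (Or.inr h)

-- ===== VERDICT (by name: the statement is the Claim_ definition above) =====
theorem min_odd_spec : Claim_equal_min_odd := by
  intro lst _
  unfold Spec_min_odd min_odd min_odd_alt
  simp only [foldl_step_filter, minOddSeed_eq]
  cases hf : lst.filter (fun x => PySem.Int.mod x 2 = 1) with
  | nil => simp [PySem.List.sorted]
  | cons y ys =>
    -- A's value r: the min-fold over the odd elements, seeded with the first one
    set r := (y :: ys).foldl min y with hr
    have hrle : ∀ x ∈ y :: ys, r ≤ x := (foldl_min_le (y :: ys) y).2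
    have hrmem : r ∈ y :: ys := by
      rcases foldl_min_mem (y :: ys) y with h | h
      · rw [hr, h]; exact List.mem_cons_self
      · exact h
    -- B's value m: the head of the sorted odd elements
    cases hs : PySem.List.sorted (y :: ys) (fun x => x) false with
    | nil => exact absurd ((PySem.List.sorted_eq_nil_iff _ _ _).1 hs) (by simp)
    | cons m t =>
      have hmle : ∀ x ∈ y :: ys, m ≤ x := PySem.List.key_head_sorted_le _ _ hs
      have hmmem : m ∈ y :: ys := by
        have : m ∈ m :: t := List.mem_cons_self
        rw [← hs, PySem.List.mem_sorted] at this
        exact this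
      have heq : r = m := le_antisymm (hrle m hmmem) (hmle r hrmem)
      have hm : (match m :: t with | [] => (0:Int) | y :: _ => y) = m := rfl
      rw [heq, hm]
      split_ifs with h
      · rfl
      · omega
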